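-- pv_equiv track=rewrite | github.com/Demerier/Genshin-Impact-Miliastra-Wonderland-Document | scripts/ai_full_inspection.py | evaluate_content
-- ===== SOURCE A (Python) =====
-- def evaluate_content(content):
--     """评估内容质量"""
--     score = 100
--
--     # 内容长度评分
--     content_length = len(content)
--     if content_length < 50:
--         score -= 30
--     elif content_length < 100:
--         score -= 20
--     elif content_length < 200:
--         score -= 10
--
--     # 检查内容完整性
--     if '...' in content[-10:]:  # 内容可能被截断
--         score -= 20
--
--     # 检查内容可读性
--     lines = [line for line in content.split('\n') if line.strip()]
--     if len(lines) < 3: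
--         score -= 15
--
--     # 检查是否有重复内容
--     if len(content) > 100:
--         # 简单检查是否有大段重复
--         for i in range(0, len(content), 50):
--             chunk = content[i:i+50]
--             if content.count(chunk) > 3:
--                 score -= 10
--                 break
--
--     return max(0, min(100, score))
-- ===== SOURCE B (Python) =====
-- def evaluate_content(content):
--     """评估内容质量 — same result, computed as 100 minus independent penalties
--     (total penalty is at most 75, so A's max/min clamp is provably redundant);
--     non-empty lines are counted in a single character scan instead of
--     split+strip, and the repetition check is an any() over the chunks."""
--     n = len(content)
--     length_pen = 30 if n < 50 else 20 if n < 100 else 10 if n < 200 else 0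
--     trunc_pen = 20 if '...' in content[-10:] else 0
--     lines = 0
--     has_text = False
--     for c in content:
--         if c == '\n':
--             if has_text:
--                 lines += 1
--             has_text = False
--         elif not c.isspace():
--             has_text = True
--     if has_text:
--         lines += 1
--     lines_pen = 15 if lines < 3 else 0
--     rep_pen = 10 if n > 100 and any(
--         content.count(content[i:i + 50]) > 3 for i in range(0, n, 50)) else 0
--     return 100 - length_pen - trunc_pen - lines_pen - rep_pen
-- ===== Notes on version B (the rewrite author's own statement) =====
-- stated objective: simpler
-- what changed: B drops A's score accumulator and clamp (the four penalties sum to at most 75, so the max/min clamp is provably redundant) and returns 100 minus four independently computed penalties; non-empty lines are counted in one character scan instead of splitting on newlines and stripping each line, and the break-loop repetition check becomes an any() over the chunks.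
import Mathlib
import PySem

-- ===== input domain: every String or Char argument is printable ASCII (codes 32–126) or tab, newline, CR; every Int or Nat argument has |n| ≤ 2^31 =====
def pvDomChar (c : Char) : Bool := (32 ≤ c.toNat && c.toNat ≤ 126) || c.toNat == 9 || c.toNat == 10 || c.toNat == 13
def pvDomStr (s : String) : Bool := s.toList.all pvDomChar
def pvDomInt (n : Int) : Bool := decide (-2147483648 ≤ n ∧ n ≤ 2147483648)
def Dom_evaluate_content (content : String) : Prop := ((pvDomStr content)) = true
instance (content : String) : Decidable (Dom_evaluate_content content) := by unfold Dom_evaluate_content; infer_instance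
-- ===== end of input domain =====

-- B replaces A's accumulator-and-clamp scoring by 100 minus four independent penalties
-- (the clamp is redundant: penalties total ≤ 75), a one-pass character scan for the
-- non-empty-line count, and an any() over chunks for the repetition check.

-- ===== PORT A =====
-- the 'for i in range(0, len(content), 50): … break' loop of A
def pvRepLoop (content : String) : List Int → Int → Int
  | [], score => score
  | i :: rest, score =>
    if PySem.Str.count content (PySem.Str.slice content (some i) (some (i + 50))) > 3 then
      score - 10
    else pvRepLoop content rest score

def evaluate_content (content : String) : Int :=
  let score : Int := 100
  let contentLength := PySem.Str.len content
  let score := if contentLength < 50 then score - 30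
               else if contentLength < 100 then score - 20
               else if contentLength < 200 then score - 10
               else score
  let score := if PySem.Str.isIn "..." (PySem.Str.slice content (some (-10)) none) then score - 20
               else score
  let lines := ((PySem.Str.split? content "\n").getD []).filter
                 (fun line => PySem.Str.strip line != "")
  let score := if (lines.length : Int) < 3 then score - 15 else score
  let score := if PySem.Str.len content > 100 then
                 pvRepLoop content (PySem.List.pyRange 0 (PySem.Str.len content) 50) score
               else score
  max 0 (min 100 score)

-- ===== PORT B =====
-- B's single character scan counting lines that contain a non-whitespace char
def pvAltLines : List Char → Bool → Int → Int
  | [], hasText, lines => lines + (if hasText then 1 else 0)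
  | c :: cs, hasText, lines =>
    if c = '\n' then pvAltLines cs false (lines + (if hasText then 1 else 0))
    else if ¬ PySem.Chars.isspace c then pvAltLines cs true lines
    else pvAltLines cs hasText lines

def evaluate_content_alt (content : String) : Int :=
  let n := PySem.Str.len content
  let lengthPen : Int := if n < 50 then 30 else if n < 100 then 20 else if n < 200 then 10 else 0
  let truncPen : Int :=
    if PySem.Str.isIn "..." (PySem.Str.slice content (some (-10)) none) then 20 else 0
  let linesPen : Int := if pvAltLines content.toList false 0 < 3 then 15 else 0
  let repPen : Int :=
    if n > 100 then
      (if (PySem.List.pyRange 0 n 50).any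
          (fun i => PySem.Str.count content (PySem.Str.slice content (some i) (some (i + 50))) > 3)
       then 10 else 0)
    else 0
  100 - lengthPen - truncPen - linesPen - repPen

-- ===== PRECONDITION & SPEC =====
def Spec_evaluate_content (content : String) (out : Int) : Prop := out = evaluate_content_alt content
instance (content : String) (out : Int) : Decidable (Spec_evaluate_content content out) := by unfold Spec_evaluate_content; infer_instance

-- ===== CLAIM (what is proved, stated in full; the proofs are below) =====
def Claim_equal_evaluate_content : Prop := ∀ (content : String), Dom_evaluate_content content → Spec_evaluate_content content (evaluate_content content)

-- ===== LEMMAS AND PROOFS =====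

-- proof-only helper: the line count B's scan computes, as a Nat
def pvScanN : List Char → Bool → Nat
  | [], hasText => if hasText then 1 else 0
  | c :: cs, hasText =>
    if c = '\n' then (if hasText then 1 else 0) + pvScanN cs false
    else pvScanN cs (hasText || !PySem.Chars.isspace c)

theorem pvAltLines_eq (l : List Char) : ∀ (hasText : Bool) (lines : Int),
    pvAltLines l hasText lines = lines + (pvScanN l hasText : Int) := by
  induction l with
  | nil => intro hasText lines; simp [pvAltLines, pvScanN]
  | cons c cs ih =>
    intro hasText lines
    by_cases hc : c = '\n'
    · simp [pvAltLines, pvScanN, hc, ih]; ring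
    · by_cases hs : PySem.Chars.isspace c
      · simp [pvAltLines, pvScanN, hc, hs, ih]
      · simp [pvAltLines, pvScanN, hc, hs, ih]

theorem pvStrip_eq_nil_iff (x : List Char) :
    (PySem.Chars.strip x = []) ↔ ∀ c ∈ x, PySem.Chars.isspace c = true := by
  simp only [PySem.Chars.strip, PySem.Chars.rstrip, PySem.Chars.lstrip,
    List.reverse_eq_nil_iff, List.dropWhile_eq_nil_iff, List.mem_reverse]
  constructor
  · intro h c hc
    have hx := List.takeWhile_append_dropWhile (p := PySem.Chars.isspace) (l := x)
    rcases List.mem_append.mp (by rw [hx]; exact hc) with h1 | h2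
    · exact List.mem_takeWhile_imp h1
    · exact h c h2
  · intro h c hc
    exact h c (List.dropWhile_subset _ hc)

-- the predicate A filters lines by, on the Chars side
theorem pvSplitOn_go_countP (l : List Char) : ∀ (fuel : Nat), l.length < fuel →
    ∀ (cur : List Char) (acc : List (List Char)),
    (PySem.Chars.splitOn.go ['\n'] fuel l cur acc).countP
        (fun x => x.any (fun c => !PySem.Chars.isspace c))
      = acc.countP (fun x => x.any (fun c => !PySem.Chars.isspace c))
        + pvScanN l (cur.any (fun c => !PySem.Chars.isspace c)) := by
  induction l with
  | nil =>
    intro fuel hf cur acc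
    match fuel, hf with
    | fuel + 1, _ =>
      simp [PySem.Chars.splitOn.go, pvScanN, List.countP_reverse, List.countP_cons,
        List.any_reverse]
  | cons c cs ih =>
    intro fuel hf cur acc
    match fuel, hf with
    | fuel + 1, hf =>
      by_cases hc : c = '\n'
      · subst hc
        have hpre : List.isPrefixOf ['\n'] ('\n' :: cs) = true := by
          simp [List.isPrefixOf]
        rw [PySem.Chars.splitOn.go]
        simp only [hpre, if_pos, List.length_cons, List.length_nil, Nat.zero_add,
          List.drop_succ_cons, List.drop_zero]
        rw [ih fuel (by simpa using hf) [] (List.reverse cur :: acc)]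
        cases h : cur.any (fun c => !PySem.Chars.isspace c) <;>
          simp [pvScanN, List.any_reverse, h] <;> omega
      · have hpre : List.isPrefixOf ['\n'] (c :: cs) = false := by
          simp [List.isPrefixOf]; exact fun h => absurd h.symm hc
        rw [PySem.Chars.splitOn.go]
        simp only [hpre, Bool.false_eq_true, if_neg, not_false_eq_true]
        rw [ih fuel (by simpa using hf) (c :: cur) acc]
        simp [pvScanN, hc, Bool.or_comm]

theorem pvSplitOn_countP (cs : List Char) :
    (PySem.Chars.splitOn cs ['\n']).countP (fun x => x.any (fun c => !PySem.Chars.isspace c))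
      = pvScanN cs false := by
  rw [PySem.Chars.splitOn, pvSplitOn_go_countP cs (cs.length + 1) (by omega) [] []]
  simp

theorem pvLines_eq (content : String) :
    (((PySem.Str.split? content "\n").getD []).filter
        (fun line => PySem.Str.strip line != "")).length
      = pvScanN content.toList false := by
  have hmap := PySem.Str.split?_map content "\n"
  rw [show ("\n" : String).toList = ['\n'] from rfl] at hmap
  rw [PySem.Chars.split?] at hmap
  simp only [List.isEmpty_cons, if_false, Bool.false_eq_true] at hmap
  obtain ⟨LS, hLS, hmapeq⟩ : ∃ LS, PySem.Str.split? content "\n" = some LS ∧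
      LS.map String.toList = PySem.Chars.splitOn content.toList ['\n'] := by
    cases h : PySem.Str.split? content "\n" with
    | none => rw [h] at hmap; simp at hmap
    | some LS => rw [h] at hmap; exact ⟨LS, rfl, by simpa using hmap⟩
  rw [hLS, Option.getD_some, ← List.countP_eq_length_filter, ← pvSplitOn_countP, ← hmapeq,
    List.countP_map]
  apply List.countP_congr
  intro line _
  have hb : (PySem.Str.strip line != "") =
      ((fun x => x.any fun c => !PySem.Chars.isspace c) ∘ String.toList) line := by
    simp only [Function.comp]
    cases h : line.toList.any (fun c => !PySem.Chars.isspace c)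
    · have h1 : PySem.Chars.strip line.toList = [] :=
        (pvStrip_eq_nil_iff _).mpr (by simpa [List.any_eq_false] using h)
      have h2 : (PySem.Str.strip line).toList = [] := by
        rw [PySem.Str.toList_strip]; exact h1
      simp [bne, String.toList_eq_nil_iff.mp h2]
    · have hne : PySem.Chars.strip line.toList ≠ [] := by
        intro hx
        rcases List.any_eq_true.mp h with ⟨c, hc, hcs⟩
        have := (pvStrip_eq_nil_iff _).mp hx c hc
        simp [this] at hcs
      have h2 : PySem.Str.strip line ≠ "" := by
        intro hx
        exact hne (by rw [← PySem.Str.toList_strip, hx]; rfl)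
      simp [bne, h2]
  rw [hb]

theorem pvRepLoop_eq (content : String) (l : List Int) (score : Int) :
    pvRepLoop content l score =
      if l.any (fun i =>
          PySem.Str.count content (PySem.Str.slice content (some i) (some (i + 50))) > 3)
      then score - 10 else score := by
  induction l with
  | nil => simp [pvRepLoop]
  | cons i rest ih =>
    simp only [pvRepLoop, List.any_cons, Bool.or_eq_true, decide_eq_true_eq]
    by_cases h : PySem.Str.count content (PySem.Str.slice content (some i) (some (i + 50))) > 3
    · rw [if_pos h, if_pos (Or.inl h)]
    · rw [if_neg h, ih]
      by_cases hr : (rest.any (fun i =>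
          PySem.Str.count content (PySem.Str.slice content (some i) (some (i + 50))) > 3)) = true
      · rw [if_pos hr, if_pos (Or.inr hr)]
      · rw [if_neg hr, if_neg (by rintro (hh | hh); exacts [h hh, hr hh])]

-- ===== VERDICT (by name: the statement is the Claim_ definition above) =====
theorem evaluate_content_spec : Claim_equal_evaluate_content := by
  intro content _
  unfold Spec_evaluate_content evaluate_content evaluate_content_alt
  simp only [pvRepLoop_eq, pvAltLines_eq, pvLines_eq]
  split_ifs <;> omega
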